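-- pv_equiv track=rewrite | github.com/peter941221/Provable-80-20-sBTC-Pool-Core | sim/reference_model.py | floor_root4
-- ===== SOURCE A (Python) =====
-- def pow4(value: int) -> int:
--     return value * value * value * value
--
-- def floor_root4(value: int) -> int:
--     left, right = 0, 2**32
--     while left < right:
--         mid = (left + right + 1) // 2
--         if pow4(mid) <= value:
--             left = mid
--         else:
--             right = mid - 1
--     return left
-- ===== SOURCE B (Python) =====
-- def _isqrt(n: int) -> int:
--     # Newton's method for floor(sqrt(n)), n >= 0.
--     if n < 2:
--         return n
--     x = n
--     y = (x + n // x) // 2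
--     while y < x:
--         x = y
--         y = (x + n // x) // 2
--     return x
--
-- def floor_root4(value: int) -> int:
--     if value < 0:
--         return 0
--     return _isqrt(_isqrt(value))
-- ===== Notes on version B (the rewrite author's own statement) =====
-- stated objective: alternative
-- what changed: Replaces the binary search over [0,2^32] with 4th-power tests by two nested Newton-iteration integer square roots (floor_root4(v) = isqrt(isqrt(v))), with the same guard behaviour on negative input.
import Mathlib
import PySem

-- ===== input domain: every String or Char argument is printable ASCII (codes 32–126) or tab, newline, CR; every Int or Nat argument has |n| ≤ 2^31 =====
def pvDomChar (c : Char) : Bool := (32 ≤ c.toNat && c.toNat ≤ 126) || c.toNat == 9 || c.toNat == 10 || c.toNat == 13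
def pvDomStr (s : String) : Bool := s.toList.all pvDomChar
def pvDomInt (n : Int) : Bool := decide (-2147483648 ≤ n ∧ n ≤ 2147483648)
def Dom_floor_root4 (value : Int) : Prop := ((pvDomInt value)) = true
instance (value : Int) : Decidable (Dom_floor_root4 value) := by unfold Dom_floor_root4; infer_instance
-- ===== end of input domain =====

-- B replaces A's binary search with two nested Newton-iteration integer square roots (alternative algorithm, same values).

-- ===== PORT A =====
def pow4 (value : Int) : Int := value * value * value * value

-- the while-loop of A, recursion on the shrinking interval (exact transliteration)
def floorRoot4Go (value l r : Int) : Int :=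
  if h : l < r then
    let mid := PySem.Int.floordiv (l + r + 1) 2
    if pow4 mid ≤ value then floorRoot4Go value mid r
    else floorRoot4Go value l (mid - 1)
  else l
termination_by (r - l).toNat
decreasing_by
  · have hb := PySem.Int.floordiv_two_mid_bounds (lo := l + 1) (hi := r) (by omega)
    have : l + 1 + r = l + r + 1 := by ring
    rw [this] at hb
    omega
  · have hb := PySem.Int.floordiv_two_mid_bounds (lo := l + 1) (hi := r) (by omega)
    have : l + 1 + r = l + r + 1 := by ring
    rw [this] at hb
    omega

def floor_root4 (value : Int) : Int := floorRoot4Go value 0 (2 ^ 32)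

-- ===== PORT B =====
-- the while-loop of B's _isqrt; fuel is only a totality guard (n.toNat is always enough)
def isqrtGo (n x : Int) : Nat → Int
  | 0 => x
  | f + 1 =>
    let y := PySem.Int.floordiv (x + PySem.Int.floordiv n x) 2
    if y < x then isqrtGo n y f else x

def isqrtB (n : Int) : Int := if n < 2 then n else isqrtGo n n n.toNat

def floor_root4_alt (value : Int) : Int :=
  if value < 0 then 0 else isqrtB (isqrtB value)

-- ===== PRECONDITION & SPEC =====
def Spec_floor_root4 (value : Int) (out : Int) : Prop := out = floor_root4_alt value
instance (value : Int) (out : Int) : Decidable (Spec_floor_root4 value out) := by unfold Spec_floor_root4; infer_instance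

-- ===== CLAIM (what is proved, stated in full; the proofs are below) =====
def Claim_equal_floor_root4 : Prop := ∀ (value : Int), Dom_floor_root4 value → Spec_floor_root4 value (floor_root4 value)

-- ===== LEMMAS AND PROOFS =====

lemma pow4_mono {a b : Int} (ha : 0 ≤ a) (hab : a ≤ b) : pow4 a ≤ pow4 b := by
  unfold pow4
  have h2 : a * a ≤ b * b := mul_self_le_mul_self ha hab
  have h4 : (a * a) * (a * a) ≤ (b * b) * (b * b) := mul_self_le_mul_self (by positivity) h2
  nlinarith [h4]

-- A's loop on a negative value: the left bound never moves, returns 0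
lemma floorRoot4Go_neg (value : Int) (hv : value < 0) :
    ∀ m : Nat, ∀ r : Int, r.toNat = m → 0 ≤ r → floorRoot4Go value 0 r = 0 := by
  intro m
  induction m using Nat.strong_induction_on with
  | _ m ih =>
    intro r hm hr0
    rw [floorRoot4Go]
    by_cases hlt : (0:Int) < r
    · rw [dif_pos hlt]
      have hb := PySem.Int.floordiv_two_mid_bounds (lo := (0:Int) + 1) (hi := r) (by omega)
      have he : (0:Int) + 1 + r = 0 + r + 1 := by ring
      rw [he] at hb
      set mid := PySem.Int.floordiv (0 + r + 1) 2 with hmid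
      have hp : ¬ pow4 mid ≤ value := by
        have hm1 : 1 ≤ mid := hb.1
        have h0 : 0 ≤ pow4 mid := by unfold pow4; nlinarith
        omega
      rw [if_neg hp]
      exact ih (mid - 1).toNat (by omega) (mid - 1) rfl (by omega)
    · rw [dif_neg hlt]

-- A's loop when the answer t lies in [l, r] and pow4 t ≤ value < pow4 (t+1)
lemma floorRoot4Go_eq (value t : Int) (ht0 : 0 ≤ t)
    (htl : pow4 t ≤ value) (htr : value < pow4 (t + 1)) :
    ∀ m : Nat, ∀ l r : Int, (r - l).toNat = m → 0 ≤ l → l ≤ t → t ≤ r →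
      floorRoot4Go value l r = t := by
  intro m
  induction m using Nat.strong_induction_on with
  | _ m ih =>
    intro l r hm hl0 hlt htr'
    rw [floorRoot4Go]
    by_cases hlr : l < r
    · rw [dif_pos hlr]
      have hb := PySem.Int.floordiv_two_mid_bounds (lo := l + 1) (hi := r) (by omega)
      have he : l + 1 + r = l + r + 1 := by ring
      rw [he] at hb
      set mid := PySem.Int.floordiv (l + r + 1) 2 with hmid
      by_cases hp : pow4 mid ≤ value
      · rw [if_pos hp]
        have hmt : mid ≤ t := by
          by_contra hc
          have : pow4 (t + 1) ≤ pow4 mid := pow4_mono (by omega) (by omega)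
          omega
        exact ih (r - mid).toNat (by omega) mid r rfl (by omega) hmt htr'
      · rw [if_neg hp]
        have hmt : t ≤ mid - 1 := by
          by_contra hc
          have : pow4 mid ≤ pow4 t := pow4_mono (by omega) (by omega)
          omega
        exact ih (mid - 1 - l).toNat (by omega) l (mid - 1) rfl hl0 hlt hmt
    · rw [dif_neg hlr]
      omega

-- one Newton step stays at or above the true root, and strictly decreases while above it
lemma isqrtGo_eq (n : Int) (hn : 1 ≤ n) :
    ∀ f : Nat, ∀ x : Int, ((n.toNat.sqrt : Int)) ≤ x → (x - (n.toNat.sqrt : Int)).toNat < f →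
      isqrtGo n x f = (n.toNat.sqrt : Int) := by
  set s : Int := (n.toNat.sqrt : Int) with hsdef
  have htn : ((n.toNat : Nat) : Int) = n := Int.toNat_of_nonneg (by omega)
  have hs1 : 1 ≤ s := by
    have h1 : 1 ≤ n.toNat.sqrt := by
      have h : 1 ≤ n.toNat := by omega
      calc 1 = Nat.sqrt 1 := by simp
        _ ≤ _ := Nat.sqrt_le_sqrt h
    rw [hsdef]; exact_mod_cast h1
  have hss : s * s ≤ n := by
    have h := Nat.sqrt_le' n.toNat
    have h' : n.toNat.sqrt * n.toNat.sqrt ≤ n.toNat := by nlinarith [h]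
    have h2 : ((n.toNat.sqrt * n.toNat.sqrt : Nat) : Int) ≤ ((n.toNat : Nat) : Int) := by
      exact_mod_cast h'
    rw [htn] at h2
    rw [hsdef]; push_cast at h2 ⊢; linarith
  have hlt : n < (s + 1) * (s + 1) := by
    have h := Nat.lt_succ_sqrt' n.toNat
    have h' : n.toNat < (n.toNat.sqrt + 1) * (n.toNat.sqrt + 1) := by nlinarith [h]
    have h2 : ((n.toNat : Nat) : Int) < (((n.toNat.sqrt + 1) * (n.toNat.sqrt + 1) : Nat) : Int) := by
      exact_mod_cast h'
    rw [htn] at h2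
    rw [hsdef]; push_cast at h2 ⊢; linarith
  intro f
  induction f with
  | zero => intro x _ hf; omega
  | succ f ih =>
    intro x hsx hf
    have hx1 : 1 ≤ x := le_trans hs1 hsx
    show (let y := PySem.Int.floordiv (x + PySem.Int.floordiv n x) 2;
          if y < x then isqrtGo n y f else x) = s
    set q : Int := PySem.Int.floordiv n x with hq
    have hqspec := PySem.Int.floordiv_mul_add_mod n x
    have hmod0 := PySem.Int.mod_nonneg n (b := x) (by omega)
    have hmodlt := PySem.Int.mod_lt n (b := x) (by omega)
    rw [← hq] at hqspec
    -- Fact 1: s ≤ y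
    have hy_ge : s ≤ PySem.Int.floordiv (x + q) 2 := by
      rw [PySem.Int.le_floordiv_iff_mul_le (by omega : (0:Int) < 2)]
      -- s * 2 ≤ x + q : else n < (q+1)*x ≤ (2s - x)*x ≤ s*s ≤ n
      by_contra hc
      have hc' : x + q ≤ 2 * s - 1 := by omega
      have h1 : n < (q + 1) * x := by nlinarith
      have h2 : (q + 1) * x ≤ (2 * s - x) * x := by nlinarith
      nlinarith [sq_nonneg (x - s)]
    set y : Int := PySem.Int.floordiv (x + q) 2 with hy
    by_cases hyx : y < x
    · rw [if_pos hyx]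
      exact ih y hy_ge (by omega)
    · rw [if_neg hyx]
      -- x ≤ y; if s < x then y < x (Fact 2), contradiction; so x = s
      by_contra hxs
      have hsx' : s + 1 ≤ x := by omega
      have hnx : n < x * x := by nlinarith
      have hqlt : q < x := by
        rw [hq, PySem.Int.floordiv_lt_iff_lt_mul (by omega : (0:Int) < x)]
        exact hnx
      have : y < x := by
        rw [hy, PySem.Int.floordiv_lt_iff_lt_mul (by omega : (0:Int) < 2)]
        omega
      omega

lemma isqrtB_eq (n : Int) (hn : 0 ≤ n) : isqrtB n = (n.toNat.sqrt : Int) := by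
  unfold isqrtB
  by_cases h2 : n < 2
  · rw [if_pos h2]
    interval_cases n <;> simp
  · rw [if_neg h2]
    have h2' : 2 ≤ n := by omega
    have hs1 : 1 ≤ n.toNat.sqrt := by
      have : 1 ≤ n.toNat := by omega
      calc 1 = Nat.sqrt 1 := by simp
        _ ≤ _ := Nat.sqrt_le_sqrt this
    have hsn : (n.toNat.sqrt : Int) ≤ n := by
      have := Nat.sqrt_le_self n.toNat
      have : (n.toNat.sqrt : Int) ≤ (n.toNat : Int) := by exact_mod_cast this
      omega
    exact isqrtGo_eq n (by omega) n.toNat n hsn (by omega)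

-- ===== VERDICT (by name: the statement is the Claim_ definition above) =====
theorem floor_root4_spec : Claim_equal_floor_root4 := by
  intro value hdom
  unfold Spec_floor_root4 floor_root4 floor_root4_alt
  by_cases hneg : value < 0
  · rw [if_pos hneg]
    exact floorRoot4Go_neg value hneg _ (2 ^ 32) rfl (by norm_num)
  · rw [if_neg hneg]
    replace hneg : 0 ≤ value := by omega
    have hdom' : value ≤ 2147483648 := by
      simp only [Dom_floor_root4, pvDomInt, decide_eq_true_eq] at hdom
      omega
    rw [isqrtB_eq value hneg]
    rw [isqrtB_eq _ (by positivity)]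
    set a : Nat := value.toNat with ha
    have hva : value = (a : Int) := by omega
    set s1 : Nat := a.sqrt with hs1
    set t : Nat := s1.sqrt with ht
    simp only [Int.toNat_natCast]
    -- characterize t : pow4 t ≤ value < pow4 (t+1)
    have h1 : s1 * s1 ≤ a := by nlinarith [Nat.sqrt_le' a]
    have h2 : a < (s1 + 1) * (s1 + 1) := by nlinarith [Nat.lt_succ_sqrt' a]
    have h3 : t * t ≤ s1 := by nlinarith [Nat.sqrt_le' s1]
    have h4 : s1 < (t + 1) * (t + 1) := by nlinarith [Nat.lt_succ_sqrt' s1]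
    have hlow : pow4 (t : Int) ≤ value := by
      unfold pow4
      rw [hva]
      have h : t * t * t * t ≤ a := by nlinarith
      exact_mod_cast h
    have hhigh : value < pow4 ((t : Int) + 1) := by
      unfold pow4
      rw [hva]
      have h : a < (t + 1) * (t + 1) * (t + 1) * (t + 1) := by nlinarith
      exact_mod_cast h
    have htle : (t : Int) ≤ 2 ^ 32 := by
      have hta : t ≤ a := le_trans (Nat.sqrt_le_self s1) (Nat.sqrt_le_self a)
      have : (t : Int) ≤ (a : Int) := by exact_mod_cast hta
      rw [← hva] at this
      omega
    exact floorRoot4Go_eq value (t : Int) (by positivity) hlow hhigh _ 0 (2 ^ 32) rfl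
      (by omega) (by positivity) htle
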